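-- pv_equiv track=rewrite | github.com/iriscxy/Unified-Timeline-Summarizer | bleu/calculatebleu.py | triGram
-- ===== SOURCE A (Python) =====
-- def triGramDictionary(sentence):
--     dictionary = {}
--     if len(sentence) < 2:
--         return dictionary
--     for i in range(0, len(sentence)):
--         # print i
--         if i == len(sentence) - 2:
--             break
--         else:
--             trigram = sentence[i] + " " + sentence[i + 1] + " " + sentence[i + 2]
--             if trigram in dictionary:
--                 dictionary[trigram] += 1
--             else:
--                 dictionary[trigram] = 1
--     return dictionary
--
-- def triGram(candidateSentence, referenceSentences):
--     referenceDict = []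
--     candidateSentence = candidateSentence.lower().split()
--     candidateSentence = list(filter(lambda x: x is not None, candidateSentence))
--     candidateDict = triGramDictionary(candidateSentence)
--     count = 0
--     for line in referenceSentences:
--         line = line.lower().split()
--         line = list(filter(lambda x: x is not None, line))
--         referenceDict.append(triGramDictionary(line))
--     for word in candidateDict:
--         maxRefIndex = 0
--         for index2 in range(0, len(referenceDict)):
--             if word in referenceDict[index2]:
--                 maxRefIndex = max(maxRefIndex, referenceDict[index2][word])
--
--         count += min(candidateDict[word], maxRefIndex)
--     sumngram = 0
--     for values in candidateDict.values():
--         sumngram += values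
--     return count, sumngram
-- ===== SOURCE B (Python) =====
-- def triGram(candidateSentence, referenceSentences):
--     def trigrams(sentence):
--         toks = sentence.lower().split()
--         return [toks[i] + " " + toks[i + 1] + " " + toks[i + 2]
--                 for i in range(len(toks) - 2)]
--
--     # One merged max-count dictionary over all references, built in one pass.
--     maxRef = {}
--     for line in referenceSentences:
--         counts = {}
--         for t in trigrams(line):
--             counts[t] = counts.get(t, 0) + 1
--         for t, c in counts.items():
--             if c > maxRef.get(t, 0):
--                 maxRef[t] = c
--
--     cand = trigrams(candidateSentence)
--     candCounts = {}
--     for t in cand: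
--         candCounts[t] = candCounts.get(t, 0) + 1
--     count = sum(min(c, maxRef.get(t, 0)) for t, c in candCounts.items())
--     return count, len(cand)
-- ===== Notes on version B (the rewrite author's own statement) =====
-- stated objective: alternative
-- what changed: Instead of scanning every reference trigram dictionary once per distinct candidate trigram, B merges all references into one max-count dictionary in a single pass and does one lookup per candidate trigram; the trigram total is just the length of the candidate trigram list.
import Mathlib
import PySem

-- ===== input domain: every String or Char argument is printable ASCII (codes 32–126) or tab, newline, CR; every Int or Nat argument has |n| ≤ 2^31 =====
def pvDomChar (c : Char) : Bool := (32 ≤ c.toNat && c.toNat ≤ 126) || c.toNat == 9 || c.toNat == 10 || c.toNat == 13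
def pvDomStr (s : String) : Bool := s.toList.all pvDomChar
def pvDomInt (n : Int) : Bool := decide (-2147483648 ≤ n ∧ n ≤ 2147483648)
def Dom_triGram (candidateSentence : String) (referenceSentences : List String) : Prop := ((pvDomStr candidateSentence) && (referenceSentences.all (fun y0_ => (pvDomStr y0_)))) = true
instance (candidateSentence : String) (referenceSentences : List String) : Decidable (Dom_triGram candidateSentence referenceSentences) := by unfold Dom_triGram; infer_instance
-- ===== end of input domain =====

-- B replaces A's per-candidate-key scan over all reference trigram dicts by one merged
-- max-count dict built in a single pass over the references, then one lookup per trigram.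

-- ===== PORT A =====
-- trigram = sentence[i] + " " + sentence[i+1] + " " + sentence[i+2]  (indices always in range when used)
def pvTriA (s : List String) (i : Int) : String :=
  PySem.List.pyGetD s i "" ++ " " ++ PySem.List.pyGetD s (i + 1) "" ++ " " ++ PySem.List.pyGetD s (i + 2) ""

-- the 'for i in range(0, len(sentence)): if i == len(sentence)-2: break else: …' loop
def pvTgdLoop (s : List String) (i : Nat) (d : PySem.Dict String Int) : PySem.Dict String Int :=
  if i < s.length then
    if i = s.length - 2 then d
    else
      let tri := pvTriA s (i : Int)
      pvTgdLoop s (i + 1) (if d.contains tri then d.modify tri 0 (· + 1) else d.insert tri 1)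
  else d
termination_by s.length - i

def triGramDictionary (sentence : List String) : PySem.Dict String Int :=
  if sentence.length < 2 then PySem.Dict.empty
  else pvTgdLoop sentence 0 PySem.Dict.empty

def triGram (candidateSentence : String) (referenceSentences : List String) : Int × Int :=
  -- candidateSentence = list(filter(lambda x: x is not None, candidateSentence.lower().split()))
  -- (the filter is the identity on a list of strings)
  let cand := (PySem.Str.split₀ (PySem.Str.lower candidateSentence)).filter (fun _ => true)
  let candidateDict := triGramDictionary cand
  let referenceDict := referenceSentences.foldl
    (fun acc line =>
      acc ++ [triGramDictionary ((PySem.Str.split₀ (PySem.Str.lower line)).filter (fun _ => true))]) []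
  let count := candidateDict.keys.foldl
    (fun count word =>
      let maxRefIndex := (PySem.List.pyRange 0 (PySem.List.len referenceDict)).foldl
        (fun m idx =>
          let d := PySem.List.pyGetD referenceDict idx PySem.Dict.empty
          if d.contains word then max m (d.getD word 0) else m) 0
      count + min (candidateDict.getD word 0) maxRefIndex) 0
  let sumngram := candidateDict.values.foldl (fun acc v => acc + v) 0
  (count, sumngram)

-- ===== PORT B =====
-- [toks[i] + " " + toks[i+1] + " " + toks[i+2] for i in range(len(toks) - 2)]
def pvTrigramsB (sentence : String) : List String :=
  let toks := PySem.Str.split₀ (PySem.Str.lower sentence)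
  (PySem.List.pyRange 0 ((toks.length : Int) - 2)).map
    (fun i => PySem.List.pyGetD toks i "" ++ " " ++ PySem.List.pyGetD toks (i + 1) "" ++ " " ++ PySem.List.pyGetD toks (i + 2) "")

def triGram_alt (candidateSentence : String) (referenceSentences : List String) : Int × Int :=
  let maxRef := referenceSentences.foldl
    (fun maxRef line =>
      let counts := (pvTrigramsB line).foldl (fun d t => d.insert t (d.getD t 0 + 1)) PySem.Dict.empty
      counts.items.foldl (fun maxRef p => if p.2 > maxRef.getD p.1 0 then maxRef.insert p.1 p.2 else maxRef) maxRef)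
    PySem.Dict.empty
  let cand := pvTrigramsB candidateSentence
  let candCounts := cand.foldl (fun d t => d.insert t (d.getD t 0 + 1)) PySem.Dict.empty
  let count := candCounts.items.foldl (fun acc p => acc + min p.2 (maxRef.getD p.1 0)) 0
  (count, (cand.length : Int))

-- ===== PRECONDITION & SPEC =====
def Spec_triGram (candidateSentence : String) (referenceSentences : List String) (out : Int × Int) : Prop := out = triGram_alt candidateSentence referenceSentences
instance (candidateSentence : String) (referenceSentences : List String) (out : Int × Int) : Decidable (Spec_triGram candidateSentence referenceSentences out) := by unfold Spec_triGram; infer_instance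

-- ===== CLAIM (what is proved, stated in full; the proofs are below) =====
def Claim_equal_triGram : Prop := ∀ (candidateSentence : String) (referenceSentences : List String), Dom_triGram candidateSentence referenceSentences → Spec_triGram candidateSentence referenceSentences (triGram candidateSentence referenceSentences)

-- ===== LEMMAS AND PROOFS =====

-- the per-sentence trigram list, index form
def pvTriList (s : List String) : List String :=
  (List.range (s.length - 2)).map (fun (j : Nat) => pvTriA s (j : Int))

-- A's branchy counting update is Dict.modify
theorem pvUpd_eq_modify (d : PySem.Dict String Int) (t : String) :
    (if d.contains t then d.modify t 0 (· + 1) else d.insert t 1) = d.modify t 0 (· + 1) := by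
  by_cases h : d.contains t
  · simp [h]
  · have h' : d.contains t = false := by simpa using h
    simp [PySem.Dict.modify, PySem.Dict.insert, h',
      PySem.Dict.getD_of_not_contains d (0 : Int) h']

theorem pvTgdLoop_eq (s : List String) (k : Nat) :
    ∀ (i : Nat) (d : PySem.Dict String Int), i + k = s.length - 2 → 2 ≤ s.length →
    pvTgdLoop s i d =
      ((List.range k).map (fun (j : Nat) => pvTriA s ((i + j : Nat) : Int))).foldl
        (fun d t => d.modify t 0 (· + 1)) d := by
  induction k with
  | zero =>
    intro i d hik hlen
    rw [pvTgdLoop]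
    simp at hik
    have hi : i < s.length := by omega
    simp [hik]
  | succ k ih =>
    intro i d hik hlen
    rw [pvTgdLoop]
    have hi : i < s.length := by omega
    have hne : i ≠ s.length - 2 := by omega
    simp only [hi, if_true, hne, if_false]
    rw [ih (i + 1) _ (by omega) hlen]
    rw [List.range_succ_eq_map]
    simp only [List.map_cons, List.map_map, List.foldl_cons]
    rw [pvUpd_eq_modify]
    congr 1
    apply List.map_congr_left
    intro j _
    simp only [Function.comp]
    congr 1
    omega

theorem pvTgd_eq_counter (s : List String) :
    triGramDictionary s = PySem.Dict.counter (pvTriList s) := by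
  unfold triGramDictionary pvTriList
  by_cases h : s.length < 2
  · have : s.length - 2 = 0 := by omega
    simp [h, this, PySem.Dict.counter_eq_foldl]
  · rw [if_neg h, pvTgdLoop_eq s (s.length - 2) 0 _ (by omega) (by omega),
      PySem.Dict.counter_eq_foldl]
    congr 1
    apply List.map_congr_left
    intro j _
    simp

-- B's trigram list is pvTriList of the token list
theorem pvPyRange_zero_eq (n : Nat) : ∀ (a : Int), 0 ≤ a →
    PySem.List.pyRange a (a + n) = (List.range n).map (fun (j : Nat) => a + (j : Int)) := by
  induction n with
  | zero => intro a ha; simp [PySem.List.pyRange]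
  | succ n ih =>
    intro a ha
    rw [PySem.List.pyRange_one_cons (by push_cast; omega)]
    rw [show a + (((n + 1 : Nat)) : Int) = (a + 1) + (n : Int) by push_cast; ring,
      ih (a + 1) (by omega)]
    rw [List.range_succ_eq_map]
    simp only [List.map_cons, List.map_map]
    congr 1
    · simp
    · apply List.map_congr_left
      intro j _
      simp only [Function.comp]
      push_cast
      ring

theorem pvTrigramsB_eq' (toks : List String) :
    (PySem.List.pyRange 0 ((toks.length : Int) - 2)).map
      (fun i => PySem.List.pyGetD toks i "" ++ " " ++ PySem.List.pyGetD toks (i + 1) "" ++ " " ++ PySem.List.pyGetD toks (i + 2) "") =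
    pvTriList toks := by
  unfold pvTriList pvTriA
  by_cases h : toks.length < 2
  · have h3 : toks.length - 2 = 0 := by omega
    simp [PySem.List.pyRange, h3]
    omega
  · rw [show ((toks.length : Int) - 2) = 0 + ((toks.length - 2 : Nat) : Int) by omega,
      pvPyRange_zero_eq _ 0 le_rfl]
    simp

theorem pvTrigramsB_eq (sentence : String) :
    pvTrigramsB sentence = pvTriList (PySem.Str.split₀ (PySem.Str.lower sentence)) :=
  pvTrigramsB_eq' _

-- generic: getD after B's max-merge of an items list
theorem pvMerge_getD (ps : List (String × Int)) :
    ∀ (M : PySem.Dict String Int) (w : String),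
    (ps.foldl (fun M p => if p.2 > M.getD p.1 0 then M.insert p.1 p.2 else M) M).getD w 0 =
      ps.foldl (fun m p => if p.1 = w then max m p.2 else m) (M.getD w 0) := by
  induction ps with
  | nil => intro M w; rfl
  | cons p rest ih =>
    intro M w
    simp only [List.foldl_cons]
    by_cases hc : p.2 > M.getD p.1 0
    · rw [if_pos hc, ih]
      by_cases hw : p.1 = w
      · subst hw
        rw [if_pos rfl]
        congr 1
        rw [PySem.Dict.getD_insert]
        simp
        omega
      · rw [if_neg hw]
        congr 1
        rw [PySem.Dict.getD_insert, if_neg (fun h => hw h.symm)]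
    · rw [if_neg hc, ih]
      by_cases hw : p.1 = w
      · subst hw
        rw [if_pos rfl]
        congr 1
        omega
      · rw [if_neg hw]

-- a single-hit fold over a nodup key list
theorem pvFold_nohit (ks : List String) (w : String) (f : String → Int) :
    ∀ (m : Int), (∀ k ∈ ks, k ≠ w) →
    ks.foldl (fun m k => if k = w then max m (f k) else m) m = m := by
  induction ks with
  | nil => intro m _; rfl
  | cons k rest ih =>
    intro m h
    simp only [List.foldl_cons, if_neg (h k (by simp))]
    exact ih m (fun k hk => h k (by simp [hk]))

theorem pvFold_hit (ks : List String) (w : String) (f : String → Int) :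
    ks.Nodup → ∀ (m : Int),
    ks.foldl (fun m k => if k = w then max m (f k) else m) m =
      if w ∈ ks then max m (f w) else m := by
  induction ks with
  | nil => intro _ m; rfl
  | cons k rest ih =>
    intro hnd m
    simp only [List.foldl_cons]
    rcases List.nodup_cons.mp hnd with ⟨hk, hrest⟩
    by_cases hw : k = w
    · subst hw
      rw [if_pos rfl, pvFold_nohit rest k f _ (fun x hx h => hk (h ▸ hx))]
      simp
    · rw [if_neg hw, ih hrest m]
      have hkw : ¬ (w = k) := fun h => hw h.symm
      by_cases hmem : w ∈ rest <;> simp [hmem, List.mem_cons, hkw]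

-- one merge step, with counts = counter r
theorem pvMergeStep_getD (r : List String) (M : PySem.Dict String Int) (w : String) :
    ((PySem.Dict.counter r).items.foldl
        (fun M p => if p.2 > M.getD p.1 0 then M.insert p.1 p.2 else M) M).getD w 0 =
      if w ∈ r then max (M.getD w 0) ((r.count w : Nat) : Int) else M.getD w 0 := by
  rw [pvMerge_getD, PySem.Dict.items_counter]
  rw [List.foldl_map]
  have := pvFold_hit (PySem.Set.ofList r) w (fun k => ((r.count k : Nat) : Int))
    (PySem.Set.nodup_ofList r) (M.getD w 0)
  simp only at this ⊢
  rw [this]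
  congr 1
  simp [PySem.Set.mem_ofList]

-- maxRef's lookup equals the common per-reference fold
theorem pvMaxRef_getD (refs : List String) (w : String) :
    ∀ (M : PySem.Dict String Int),
    (refs.foldl
        (fun maxRef line =>
          ((pvTrigramsB line).foldl (fun d t => d.insert t (d.getD t 0 + 1)) PySem.Dict.empty).items.foldl
            (fun maxRef p => if p.2 > maxRef.getD p.1 0 then maxRef.insert p.1 p.2 else maxRef) maxRef)
        M).getD w 0 =
      refs.foldl
        (fun m line =>
          if w ∈ pvTriList (PySem.Str.split₀ (PySem.Str.lower line))
          then max m ((((pvTriList (PySem.Str.split₀ (PySem.Str.lower line))).count w : Nat)) : Int)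
          else m)
        (M.getD w 0) := by
  induction refs with
  | nil => intro M; rfl
  | cons line rest ih =>
    intro M
    simp only [List.foldl_cons]
    rw [ih, PySem.Dict.foldl_insert_getD_add_one_eq_counter, pvTrigramsB_eq,
      pvMergeStep_getD]

-- sum of the counter's values is the list length
theorem pvSum_counts (L : List String) :
    ((PySem.Set.ofList L).map (fun k => ((L.count k : Nat) : Int))).sum = (L.length : Int) := by
  have hperm : (PySem.Set.ofList L).Perm L.dedup := by
    apply (List.perm_ext_iff_of_nodup (PySem.Set.nodup_ofList L) L.nodup_dedup).mpr
    intro a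
    simp [PySem.Set.mem_ofList, List.mem_dedup]
  rw [(hperm.map _).sum_eq]
  have h2 : (L.dedup.map (fun k => ((L.count k : Nat) : Int))).sum
      = (((L.dedup.map (fun k => L.count k)).sum : Nat) : Int) := by
    rw [Nat.cast_list_sum, List.map_map]
    rfl
  rw [h2, List.sum_map_count_dedup_eq_length]

-- A's inner max-scan over all reference dicts equals one lookup in B's merged maxRef dict
theorem pvInner_eq (refs : List String) (w : String) :
    (PySem.List.pyRange 0 (PySem.List.len (refs.map (fun line => triGramDictionary ((PySem.Str.split₀ (PySem.Str.lower line)).filter (fun _ => true)))))).foldl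
      (fun m idx =>
        if (PySem.List.pyGetD (refs.map (fun line => triGramDictionary ((PySem.Str.split₀ (PySem.Str.lower line)).filter (fun _ => true)))) idx PySem.Dict.empty).contains w
        then max m ((PySem.List.pyGetD (refs.map (fun line => triGramDictionary ((PySem.Str.split₀ (PySem.Str.lower line)).filter (fun _ => true)))) idx PySem.Dict.empty).getD w 0)
        else m) 0 =
    (refs.foldl
        (fun maxRef line =>
          ((pvTrigramsB line).foldl (fun d t => d.insert t (d.getD t 0 + 1)) PySem.Dict.empty).items.foldl
            (fun maxRef p => if p.2 > maxRef.getD p.1 0 then maxRef.insert p.1 p.2 else maxRef) maxRef)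
        PySem.Dict.empty).getD w 0 := by
  rw [PySem.List.foldl_pyRange_zero_pyGetD
    (refs.map (fun line => triGramDictionary ((PySem.Str.split₀ (PySem.Str.lower line)).filter (fun _ => true))))
    PySem.Dict.empty
    (fun m d => if d.contains w then max m (d.getD w 0) else m) 0]
  rw [List.foldl_map, pvMaxRef_getD]
  simp only [PySem.Dict.getD_empty]
  apply PySem.List.foldl_congr_mem
  intro m line _
  simp only [List.filter_true]
  rw [pvTgd_eq_counter, PySem.Dict.contains_counter, PySem.Dict.getD_counter]
  simp only [List.contains_eq_mem, decide_eq_true_eq]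

-- ===== VERDICT (by name: the statement is the Claim_ definition above) =====
theorem triGram_spec : Claim_equal_triGram := by
  intro c refs _
  unfold Spec_triGram triGram triGram_alt
  simp only []
  set toks := (PySem.Str.split₀ (PySem.Str.lower c)).filter (fun _ => true) with htoks
  set L := pvTriList toks with hL
  -- the candidate dicts on both sides are counter L
  have hcandA : triGramDictionary toks = PySem.Dict.counter L := pvTgd_eq_counter toks
  have hcandB : (pvTrigramsB c).foldl (fun d t => d.insert t (d.getD t 0 + 1)) PySem.Dict.empty
      = PySem.Dict.counter L := by
    rw [PySem.Dict.foldl_insert_getD_add_one_eq_counter, pvTrigramsB_eq, hL, htoks,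
      List.filter_true]
  have hlen : ((pvTrigramsB c).length : Int) = (L.length : Int) := by
    rw [pvTrigramsB_eq, hL, htoks, List.filter_true]
  -- referenceDict is a map
  rw [PySem.List.foldl_append_singleton_eq_map, List.nil_append, hcandA, hcandB, hlen]
  rw [Prod.mk.injEq]
  refine ⟨?_, ?_⟩
  · -- the clipped counts
    rw [PySem.Dict.items_counter, PySem.Dict.keys_counter, List.foldl_map]
    apply PySem.List.foldl_congr_mem
    intro acc w _
    dsimp only
    rw [PySem.Dict.getD_counter, pvInner_eq refs w]
  · -- sumngram = total number of candidate trigrams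
    have hv : (PySem.Dict.counter L).values =
        (PySem.Set.ofList L).map (fun k => ((L.count k : Nat) : Int)) := by
      show (PySem.Dict.counter L).items.map (·.2) = _
      rw [PySem.Dict.items_counter, List.map_map]
      rfl
    rw [hv, PySem.List.foldl_add]
    simp only [List.map_id']
    rw [pvSum_counts, zero_add]
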